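-- pv_equiv track=rewrite | github.com/pedrosimao10/Tetris-AI-Agent | student.py | aggregateHeight
-- ===== SOURCE A (Python) =====
-- def aggregateHeight(virtualgame):
--     aggregate = 0
--     for i in range(1,9,1):
--         min_Y = 30
--         for coordinates in virtualgame:
--             if (coordinates[0] == i) and (coordinates[1] < min_Y):
--                 min_Y = coordinates[1]
--         aggregate += 30-min_Y
--     return aggregate
-- ===== SOURCE B (Python) =====
-- def aggregateHeight(virtualgame):
--     mins = {}
--     for coordinates in virtualgame:
--         x, y = coordinates[0], coordinates[1]
--         if 1 <= x <= 8 and y < mins.get(x, 30):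
--             mins[x] = y
--     return sum(30 - mins.get(i, 30) for i in range(1, 9))
-- ===== Notes on version B (the rewrite author's own statement) =====
-- stated objective: idiomatic
-- what changed: Replaces A's 8 full scans of virtualgame (one per column) with a single pass building a dict of per-column minimum Y, then a fixed sweep over columns 1-8.
import Mathlib
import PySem

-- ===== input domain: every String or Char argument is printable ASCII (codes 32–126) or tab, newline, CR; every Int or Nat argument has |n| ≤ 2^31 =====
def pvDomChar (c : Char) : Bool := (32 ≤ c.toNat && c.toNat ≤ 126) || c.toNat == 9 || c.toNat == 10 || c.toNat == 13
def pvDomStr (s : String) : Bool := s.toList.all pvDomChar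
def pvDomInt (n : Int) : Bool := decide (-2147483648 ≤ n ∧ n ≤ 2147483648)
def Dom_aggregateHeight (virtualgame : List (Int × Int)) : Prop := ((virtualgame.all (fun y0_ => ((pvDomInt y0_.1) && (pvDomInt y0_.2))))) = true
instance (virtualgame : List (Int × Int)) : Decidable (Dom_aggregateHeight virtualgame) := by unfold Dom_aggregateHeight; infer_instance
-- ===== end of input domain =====

-- B replaces A's 8 repeated full scans with one dict-building pass plus a fixed sweep over columns 1..8 (constant-factor speedup).

-- ===== PORT A =====
def aggregateHeight (virtualgame : List (Int × Int)) : Int :=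
  (PySem.List.pyRange 1 9 1).foldl (fun aggregate i =>
    let minY : Int := virtualgame.foldl (fun minY coordinates =>
      if coordinates.1 = i ∧ coordinates.2 < minY then coordinates.2 else minY) 30
    aggregate + (30 - minY)) 0

-- ===== PORT B =====
def aggregateHeight_alt (virtualgame : List (Int × Int)) : Int :=
  let mins : PySem.Dict Int Int := virtualgame.foldl (fun d coordinates =>
    if 1 ≤ coordinates.1 ∧ coordinates.1 ≤ 8 ∧ coordinates.2 < d.getD coordinates.1 30
    then d.insert coordinates.1 coordinates.2 else d) PySem.Dict.empty
  ((PySem.List.pyRange 1 9 1).map (fun i => 30 - mins.getD i 30)).sum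

-- ===== PRECONDITION & SPEC =====
def Spec_aggregateHeight (virtualgame : List (Int × Int)) (out : Int) : Prop := out = aggregateHeight_alt virtualgame
instance (virtualgame : List (Int × Int)) (out : Int) : Decidable (Spec_aggregateHeight virtualgame out) := by unfold Spec_aggregateHeight; infer_instance

-- ===== CLAIM (what is proved, stated in full; the proofs are below) =====
def Claim_equal_aggregateHeight : Prop := ∀ (virtualgame : List (Int × Int)), Dom_aggregateHeight virtualgame → Spec_aggregateHeight virtualgame (aggregateHeight virtualgame)

-- ===== LEMMAS AND PROOFS =====

-- The dict built by B records, for each column i ∈ [1,8], exactly the running minimum that A's inner scan computes.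
lemma mins_getD (vg : List (Int × Int)) (d : PySem.Dict Int Int) (i : Int)
    (h1 : 1 ≤ i) (h8 : i ≤ 8) :
    (vg.foldl (fun d c =>
        if 1 ≤ c.1 ∧ c.1 ≤ 8 ∧ c.2 < d.getD c.1 30
        then d.insert c.1 c.2 else d) d).getD i 30
      = vg.foldl (fun m c => if c.1 = i ∧ c.2 < m then c.2 else m) (d.getD i 30) := by
  induction vg generalizing d with
  | nil => rfl
  | cons c rest ih =>
    simp only [List.foldl]
    rw [ih]
    congr 1
    by_cases hx : c.1 = i
    · subst hx
      by_cases hy : c.2 < d.getD c.1 30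
      · rw [if_pos ⟨h1, h8, hy⟩, if_pos ⟨rfl, hy⟩, PySem.Dict.getD_insert_self]
      · rw [if_neg (by tauto), if_neg (by tauto)]
    · have hin : (if c.1 = i ∧ c.2 < d.getD i 30 then c.2 else d.getD i 30) = d.getD i 30 :=
        if_neg (by tauto)
      rw [hin]
      split
      · exact PySem.Dict.getD_insert_of_ne d c.2 30 (fun h => hx h.symm)
      · rfl

theorem aggregateHeight_spec_aux (vg : List (Int × Int)) :
    aggregateHeight vg = aggregateHeight_alt vg := by
  unfold aggregateHeight aggregateHeight_alt
  have hr : PySem.List.pyRange 1 9 1 = [1, 2, 3, 4, 5, 6, 7, 8] := by decide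
  rw [hr]
  simp only [List.foldl, List.map, List.sum_cons, List.sum_nil]
  rw [mins_getD vg _ 1 (by norm_num) (by norm_num),
      mins_getD vg _ 2 (by norm_num) (by norm_num),
      mins_getD vg _ 3 (by norm_num) (by norm_num),
      mins_getD vg _ 4 (by norm_num) (by norm_num),
      mins_getD vg _ 5 (by norm_num) (by norm_num),
      mins_getD vg _ 6 (by norm_num) (by norm_num),
      mins_getD vg _ 7 (by norm_num) (by norm_num),
      mins_getD vg _ 8 (by norm_num) (by norm_num)]
  simp only [PySem.Dict.getD_empty]
  ring

-- ===== VERDICT (by name: the statement is the Claim_ definition above) =====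
theorem aggregateHeight_spec : Claim_equal_aggregateHeight := by
  intro vg _
  exact aggregateHeight_spec_aux vg
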